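-- pv_equiv track=rewrite | github.com/alyfdezarias/OptimizationANDSimulation | transportation.py | __canBeAdd
-- ===== SOURCE A (Python) =====
-- def __canBeAdd(loop, nextItem):
--     x = 0
--     y = 0
--     for item in loop:
--         if item[0] == nextItem[0]:
--             x += 1
--         if item[1] == nextItem[1]:
--             y += 1
--     return x<2 and y<2
-- ===== SOURCE B (Python) =====
-- def __canBeAdd(loop, nextItem):
--     # Early-exit duplicate search: instead of counting matches, find the first
--     # item matching the coordinate and then demand no further match occurs.
--     def at_most_one(seq, target):
--         it = iter(seq)
--         for v in it:
--             if v == target: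
--                 return all(w != target for w in it)
--         return True
--     return (at_most_one((p[0] for p in loop), nextItem[0])
--             and at_most_one((p[1] for p in loop), nextItem[1]))
-- ===== Notes on version B (the rewrite author's own statement) =====
-- stated objective: alternative
-- what changed: Replaces A's counting pass (two counters maintained over the whole list, then compared to 2) with a short-circuit duplicate search per coordinate: scan until the first matching value, then verify no further match in the remaining suffix, exiting early as soon as a second match is found; no counters exist in B.
import Mathlib
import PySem

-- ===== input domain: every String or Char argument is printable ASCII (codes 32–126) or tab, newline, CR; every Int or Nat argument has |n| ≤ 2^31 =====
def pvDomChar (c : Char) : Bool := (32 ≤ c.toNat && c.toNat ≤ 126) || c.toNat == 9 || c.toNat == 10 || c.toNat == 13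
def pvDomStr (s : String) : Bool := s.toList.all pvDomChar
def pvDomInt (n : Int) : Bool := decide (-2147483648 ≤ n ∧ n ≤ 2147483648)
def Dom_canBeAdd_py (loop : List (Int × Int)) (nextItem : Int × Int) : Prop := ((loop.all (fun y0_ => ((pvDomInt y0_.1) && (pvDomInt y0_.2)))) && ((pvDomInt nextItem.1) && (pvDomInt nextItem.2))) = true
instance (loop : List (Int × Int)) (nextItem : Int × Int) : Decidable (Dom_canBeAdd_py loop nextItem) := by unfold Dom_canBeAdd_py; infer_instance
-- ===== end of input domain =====

-- B replaces A's counting pass with a short-circuit duplicate search per coordinate; objective: alternative.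

-- ===== PORT A =====
-- one pass, state (x, y), branches in source order
def canBeAdd_py (loop : List (Int × Int)) (nextItem : Int × Int) : Bool :=
  let st := loop.foldl (fun (st : Int × Int) item =>
    let st := if item.1 = nextItem.1 then (st.1 + 1, st.2) else st
    if item.2 = nextItem.2 then (st.1, st.2 + 1) else st) (0, 0)
  st.1 < 2 && st.2 < 2

-- ===== PORT B =====
-- scan to the first match, then demand no further match in the remaining suffix
def atMostOne (seq : List Int) (target : Int) : Bool :=
  match seq with
  | [] => true
  | v :: rest => if v = target then rest.all (fun w => w ≠ target) else atMostOne rest target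

def canBeAdd_py_alt (loop : List (Int × Int)) (nextItem : Int × Int) : Bool :=
  atMostOne (loop.map (fun p => p.1)) nextItem.1 &&
  atMostOne (loop.map (fun p => p.2)) nextItem.2

-- ===== PRECONDITION & SPEC =====
def Spec_canBeAdd_py (loop : List (Int × Int)) (nextItem : Int × Int) (out : Bool) : Prop := out = canBeAdd_py_alt loop nextItem
instance (loop : List (Int × Int)) (nextItem : Int × Int) (out : Bool) : Decidable (Spec_canBeAdd_py loop nextItem out) := by unfold Spec_canBeAdd_py; infer_instance

-- ===== CLAIM =====
def Claim_equal_canBeAdd_py : Prop := ∀ (loop : List (Int × Int)) (nextItem : Int × Int), Dom_canBeAdd_py loop nextItem → Spec_canBeAdd_py loop nextItem (canBeAdd_py loop nextItem)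

-- ===== LEMMAS AND PROOFS =====
theorem atMostOne_iff_count (seq : List Int) (target : Int) :
    atMostOne seq target = decide (seq.countP (fun v => v = target) ≤ 1) := by
  induction seq with
  | nil => simp [atMostOne]
  | cons v rest ih =>
    by_cases h : v = target
    · simp only [atMostOne, List.countP_cons, h, decide_true, if_pos]
      have h0 : (rest.countP (fun w => decide (w = target)) + 1 ≤ 1) ↔
          rest.countP (fun w => decide (w = target)) = 0 := by omega
      rw [Bool.eq_iff_iff]
      simp [List.all_eq_true, h0, List.countP_eq_zero]
    · simp [atMostOne, h, ih]

theorem canBeAdd_fold_eq_counts (loop : List (Int × Int)) (nextItem : Int × Int) :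
    ∀ st : Int × Int,
      loop.foldl (fun (st : Int × Int) item =>
        let st := if item.1 = nextItem.1 then (st.1 + 1, st.2) else st
        if item.2 = nextItem.2 then (st.1, st.2 + 1) else st) st
      = (st.1 + (loop.countP (fun item => item.1 = nextItem.1) : Nat),
         st.2 + (loop.countP (fun item => item.2 = nextItem.2) : Nat)) := by
  induction loop with
  | nil => intro st; simp
  | cons hd tl ih =>
    intro st
    simp only [List.foldl_cons, List.countP_cons, ih]
    by_cases h1 : hd.1 = nextItem.1 <;> by_cases h2 : hd.2 = nextItem.2 <;>
      simp [h1, h2, Prod.ext_iff] <;> omega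

-- ===== VERDICT =====
theorem canBeAdd_py_spec : Claim_equal_canBeAdd_py := by
  intro loop nextItem _
  unfold Spec_canBeAdd_py canBeAdd_py canBeAdd_py_alt
  simp only [canBeAdd_fold_eq_counts, atMostOne_iff_count, List.countP_map, Function.comp_def]
  congr 1 <;> (rw [Bool.eq_iff_iff]; constructor <;> (intro h; simp only [decide_eq_true_eq] at h ⊢; omega))
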